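-- pv_equiv track=rewrite | github.com/jcgood/planars | planars/nonpermutability.py | _maximal_flexible_span
-- ===== SOURCE A (Python) =====
-- from typing import Dict, List, Optional, Set, Tuple
--
-- def _maximal_flexible_span(
--     all_positions: Set[int],
--     free_perm_positions: Set[int],
--     keystone_pos: int,
-- ) -> Tuple[int, int]:
--     """Largest contiguous span from keystone where edge positions are not free-permutable.
--
--     Walks outward through all positions (including free-permutable ones), stops only
--     at structural gaps. The edge of the returned span is always a non-free-permutable
--     position. If all positions on one side are free-permutable, that edge stays at
--     the keystone.
--     """
--     left_edge = keystone_pos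
--     prev = keystone_pos
--     for pos in sorted([p for p in all_positions if p < keystone_pos], reverse=True):
--         if pos != prev - 1:
--             break
--         prev = pos
--         if pos not in free_perm_positions:
--             left_edge = pos
--
--     right_edge = keystone_pos
--     prev = keystone_pos
--     for pos in sorted([p for p in all_positions if p > keystone_pos]):
--         if pos != prev + 1:
--             break
--         prev = pos
--         if pos not in free_perm_positions:
--             right_edge = pos
--
--     return left_edge, right_edge
-- ===== SOURCE B (Python) =====
-- def _maximal_flexible_span(all_positions, free_perm_positions, keystone_pos):
--     """Walk outward from the keystone with set-membership tests; no filtering/sorting."""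
--     left_edge = keystone_pos
--     p = keystone_pos - 1
--     while p in all_positions:
--         if p not in free_perm_positions:
--             left_edge = p
--         p -= 1
--     right_edge = keystone_pos
--     p = keystone_pos + 1
--     while p in all_positions:
--         if p not in free_perm_positions:
--             right_edge = p
--         p += 1
--     return left_edge, right_edge
-- ===== Notes on version B (the rewrite author's own statement) =====
-- stated objective: faster
-- what changed: Instead of filtering and sorting the position set on each side and scanning the sorted list for a gap, B walks outward from the keystone one step at a time using set-membership tests, so no intermediate lists are built and no sorting happens.
import Mathlib
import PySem

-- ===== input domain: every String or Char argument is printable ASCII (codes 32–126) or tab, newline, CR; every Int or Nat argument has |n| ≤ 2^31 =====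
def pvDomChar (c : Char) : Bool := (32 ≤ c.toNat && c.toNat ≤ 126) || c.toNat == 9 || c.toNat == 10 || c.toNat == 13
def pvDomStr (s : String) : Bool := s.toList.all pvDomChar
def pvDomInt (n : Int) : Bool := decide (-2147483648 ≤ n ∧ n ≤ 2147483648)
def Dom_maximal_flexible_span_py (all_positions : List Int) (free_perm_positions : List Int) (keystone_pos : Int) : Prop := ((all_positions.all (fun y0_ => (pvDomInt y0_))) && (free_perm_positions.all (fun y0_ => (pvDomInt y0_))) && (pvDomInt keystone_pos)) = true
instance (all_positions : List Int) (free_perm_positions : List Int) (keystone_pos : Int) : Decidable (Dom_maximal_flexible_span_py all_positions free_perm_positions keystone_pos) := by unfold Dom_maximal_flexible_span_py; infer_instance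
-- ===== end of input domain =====

-- B replaces A's two filter+sort passes by walking outward from the keystone with
-- plain membership tests (objective: faster — no sorting, work proportional to the span).

-- ===== PORT A =====
-- left loop of A: for pos in sorted([p < keystone], reverse=True): break on gap, track edge
def aLoopL (free : List Int) : List Int → Int → Int → Int
  | [], edge, _ => edge
  | pos :: rest, edge, prev =>
    if pos ≠ prev - 1 then edge
    else aLoopL free rest (if free.contains pos then edge else pos) pos

-- right loop of A: for pos in sorted([p > keystone]): break on gap, track edge
def aLoopR (free : List Int) : List Int → Int → Int → Int
  | [], edge, _ => edge
  | pos :: rest, edge, prev =>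
    if pos ≠ prev + 1 then edge
    else aLoopR free rest (if free.contains pos then edge else pos) pos

def maximal_flexible_span_py (all_positions : List Int) (free_perm_positions : List Int) (keystone_pos : Int) : Int × Int :=
  let left_edge := aLoopL free_perm_positions
    (PySem.List.sorted (all_positions.filter (fun p => decide (p < keystone_pos))) (fun x => x) true)
    keystone_pos keystone_pos
  let right_edge := aLoopR free_perm_positions
    (PySem.List.sorted (all_positions.filter (fun p => decide (p > keystone_pos))) (fun x => x) false)
    keystone_pos keystone_pos
  (left_edge, right_edge)

-- ===== PORT B =====
-- B's while loop: walk from p by `step` while p ∈ all; fuel = |all| bounds the iterations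
-- (each iteration consumes a distinct member of `all`, so the fuel is never the reason to stop).
def bWalk (all free : List Int) (step : Int) : Nat → Int → Int → Int
  | 0, edge, _ => edge
  | n + 1, edge, p =>
    if all.contains p then
      bWalk all free step n (if free.contains p then edge else p) (p + step)
    else edge

def maximal_flexible_span_py_alt (all_positions : List Int) (free_perm_positions : List Int) (keystone_pos : Int) : Int × Int :=
  (bWalk all_positions free_perm_positions (-1) all_positions.length keystone_pos (keystone_pos - 1),
   bWalk all_positions free_perm_positions 1 all_positions.length keystone_pos (keystone_pos + 1))

-- ===== PRECONDITION & SPEC =====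
-- Pre_ requires all_positions to be duplicate-free: the Python parameter is a set, and a
-- List Int with duplicate elements does not encode any Python set value (type convention).
def Pre_maximal_flexible_span_py (all_positions : List Int) (free_perm_positions : List Int) (keystone_pos : Int) : Prop :=
  all_positions.Nodup
instance (all_positions : List Int) (free_perm_positions : List Int) (keystone_pos : Int) : Decidable (Pre_maximal_flexible_span_py all_positions free_perm_positions keystone_pos) := by unfold Pre_maximal_flexible_span_py; infer_instance

def pvWitness_maximal_flexible_span_py : List Int × List Int × Int := ([1, 2, 4], [2], 3)

def Spec_maximal_flexible_span_py (all_positions : List Int) (free_perm_positions : List Int) (keystone_pos : Int) (out : Int × Int) : Prop := out = maximal_flexible_span_py_alt all_positions free_perm_positions keystone_pos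
instance (all_positions : List Int) (free_perm_positions : List Int) (keystone_pos : Int) (out : Int × Int) : Decidable (Spec_maximal_flexible_span_py all_positions free_perm_positions keystone_pos out) := by unfold Spec_maximal_flexible_span_py; infer_instance

-- ===== CLAIM (what is proved, stated in full; the proofs are below) =====
def Claim_equal_maximal_flexible_span_py : Prop := ∀ (all_positions : List Int) (free_perm_positions : List Int) (keystone_pos : Int), Dom_maximal_flexible_span_py all_positions free_perm_positions keystone_pos → Pre_maximal_flexible_span_py all_positions free_perm_positions keystone_pos → Spec_maximal_flexible_span_py all_positions free_perm_positions keystone_pos (maximal_flexible_span_py all_positions free_perm_positions keystone_pos)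

-- ===== LEMMAS AND PROOFS =====

-- the descending sort of {p ∈ all | p < k} starts with k-1 exactly when k-1 ∈ all
lemma sortedDesc_filter_lt_cons (all : List Int) (k : Int)
    (hnd : all.Nodup) (hk : (k - 1) ∈ all) :
    PySem.List.sorted (all.filter (fun p => decide (p < k))) (fun x => x) true
      = (k - 1) :: PySem.List.sorted (all.filter (fun p => decide (p < k - 1))) (fun x => x) true := by
  apply PySem.List.sorted_rev_eq_of_perm_of_pairwise_gt
  · have h1 : (k - 1) ∈ all.filter (fun p => decide (p < k)) :=
      List.mem_filter.mpr ⟨hk, by simp⟩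
    have hnd1 : (all.filter (fun p => decide (p < k))).Nodup := hnd.filter _
    have herase : ((all.filter (fun p => decide (p < k))).erase (k - 1)).Perm
        (all.filter (fun p => decide (p < k - 1))) := by
      rw [List.perm_ext_iff_of_nodup (hnd1.erase _) (hnd.filter _)]
      intro x
      rw [hnd1.mem_erase_iff, List.mem_filter, List.mem_filter]
      constructor
      · rintro ⟨hne, hx, hlt⟩; exact ⟨hx, by simp at hlt ⊢; omega⟩
      · rintro ⟨hx, hlt⟩; refine ⟨by simp at hlt; omega, hx, by simp at hlt ⊢; omega⟩
    exact (List.Perm.cons _ ((PySem.List.sorted_perm _ _ _).trans herase.symm)).trans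
      (List.perm_cons_erase h1).symm
  · refine List.Pairwise.cons ?_ ?_
    · intro b hb
      have := (PySem.List.mem_sorted _ _ _ _).mp hb
      have := (List.mem_filter.mp this).2
      simp at this ⊢; omega
    · have hle := PySem.List.sorted_pairwise_rev (all.filter (fun p => decide (p < k - 1))) (fun x => x)
      have hndS : (PySem.List.sorted (all.filter (fun p => decide (p < k - 1))) (fun x => x) true).Nodup :=
        ((PySem.List.sorted_perm _ _ _).nodup_iff).mpr (hnd.filter _)
      exact (hle.and hndS).imp (fun h => lt_of_le_of_ne h.1 h.2.symm)

lemma sortedAsc_filter_gt_cons (all : List Int) (k : Int)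
    (hnd : all.Nodup) (hk : (k + 1) ∈ all) :
    PySem.List.sorted (all.filter (fun p => decide (p > k))) (fun x => x) false
      = (k + 1) :: PySem.List.sorted (all.filter (fun p => decide (p > k + 1))) (fun x => x) false := by
  apply PySem.List.sorted_eq_of_perm_of_pairwise_lt
  · have h1 : (k + 1) ∈ all.filter (fun p => decide (p > k)) :=
      List.mem_filter.mpr ⟨hk, by simp⟩
    have hnd1 : (all.filter (fun p => decide (p > k))).Nodup := hnd.filter _
    have herase : ((all.filter (fun p => decide (p > k))).erase (k + 1)).Perm
        (all.filter (fun p => decide (p > k + 1))) := by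
      rw [List.perm_ext_iff_of_nodup (hnd1.erase _) (hnd.filter _)]
      intro x
      rw [hnd1.mem_erase_iff, List.mem_filter, List.mem_filter]
      constructor
      · rintro ⟨hne, hx, hlt⟩; exact ⟨hx, by simp at hlt ⊢; omega⟩
      · rintro ⟨hx, hlt⟩; refine ⟨by simp at hlt; omega, hx, by simp at hlt ⊢; omega⟩
    exact (List.Perm.cons _ ((PySem.List.sorted_perm _ _ _).trans herase.symm)).trans
      (List.perm_cons_erase h1).symm
  · refine List.Pairwise.cons ?_ ?_
    · intro b hb
      have := (PySem.List.mem_sorted _ _ _ _).mp hb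
      have := (List.mem_filter.mp this).2
      simp at this ⊢; omega
    · have hle := PySem.List.sorted_pairwise (all.filter (fun p => decide (p > k + 1))) (fun x => x)
      have hndS : (PySem.List.sorted (all.filter (fun p => decide (p > k + 1))) (fun x => x) false).Nodup :=
        ((PySem.List.sorted_perm _ _ _).nodup_iff).mpr (hnd.filter _)
      exact (hle.and hndS).imp (fun h => lt_of_le_of_ne h.1 h.2)

lemma left_eq (all free : List Int) (hnd : all.Nodup) :
    ∀ (fuel : Nat) (k edge : Int),
      (all.filter (fun p => decide (p < k))).length ≤ fuel →
      aLoopL free (PySem.List.sorted (all.filter (fun p => decide (p < k))) (fun x => x) true) edge k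
        = bWalk all free (-1) fuel edge (k - 1) := by
  intro fuel
  induction fuel with
  | zero =>
    intro k edge hlen
    have : all.filter (fun p => decide (p < k)) = [] := List.eq_nil_of_length_eq_zero (Nat.le_zero.mp hlen)
    rw [this]; rfl
  | succ n ih =>
    intro k edge hlen
    by_cases h : (k - 1) ∈ all
    · rw [sortedDesc_filter_lt_cons all k hnd h]
      have hlen2 : (all.filter (fun p => decide (p < k - 1))).length ≤ n := by
        have := congrArg List.length (sortedDesc_filter_lt_cons all k hnd h)
        rw [PySem.List.length_sorted] at this
        simp [PySem.List.length_sorted] at this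
        omega
      have hc : all.contains (k - 1) = true := by simpa using h
      simp only [aLoopL, bWalk, hc, if_true]
      rw [if_neg (by simp)]
      rw [show k - 1 + -1 = k - 1 - 1 from by ring]
      simpa using ih (k - 1) (if free.contains (k - 1) then edge else (k - 1)) hlen2
    · have hc : all.contains (k - 1) = false := by simpa using h
      simp only [bWalk, hc]
      rw [if_neg (by simp)]
      cases hs : PySem.List.sorted (all.filter (fun p => decide (p < k))) (fun x => x) true with
      | nil => rfl
      | cons pos rest =>
        have hpos : pos ∈ all := by
          have : pos ∈ PySem.List.sorted (all.filter (fun p => decide (p < k))) (fun x => x) true := by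
            rw [hs]; exact List.mem_cons_self
          exact (List.mem_filter.mp ((PySem.List.mem_sorted _ _ _ _).mp this)).1
        have hne : pos ≠ k - 1 := fun hh => h (hh ▸ hpos)
        simp only [aLoopL]
        rw [if_pos hne]

lemma right_eq (all free : List Int) (hnd : all.Nodup) :
    ∀ (fuel : Nat) (k edge : Int),
      (all.filter (fun p => decide (p > k))).length ≤ fuel →
      aLoopR free (PySem.List.sorted (all.filter (fun p => decide (p > k))) (fun x => x) false) edge k
        = bWalk all free 1 fuel edge (k + 1) := by
  intro fuel
  induction fuel with
  | zero =>
    intro k edge hlen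
    have : all.filter (fun p => decide (p > k)) = [] := List.eq_nil_of_length_eq_zero (Nat.le_zero.mp hlen)
    rw [this]; rfl
  | succ n ih =>
    intro k edge hlen
    by_cases h : (k + 1) ∈ all
    · rw [sortedAsc_filter_gt_cons all k hnd h]
      have hlen2 : (all.filter (fun p => decide (p > k + 1))).length ≤ n := by
        have h3 : (all.filter (fun p => decide (p > k))).length
            = (all.filter (fun p => decide (p > k + 1))).length + 1 := by
          have := congrArg List.length (sortedAsc_filter_gt_cons all k hnd h)
          simpa [PySem.List.length_sorted] using this
        omega
      have hc : all.contains (k + 1) = true := by simpa using h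
      simp only [aLoopR, bWalk, hc, if_true]
      rw [if_neg (by simp)]
      simpa using ih (k + 1) (if free.contains (k + 1) then edge else (k + 1)) hlen2
    · have hc : all.contains (k + 1) = false := by simpa using h
      simp only [bWalk, hc]
      rw [if_neg (by simp)]
      cases hs : PySem.List.sorted (all.filter (fun p => decide (p > k))) (fun x => x) false with
      | nil => rfl
      | cons pos rest =>
        have hpos : pos ∈ all := by
          have : pos ∈ PySem.List.sorted (all.filter (fun p => decide (p > k))) (fun x => x) false := by
            rw [hs]; exact List.mem_cons_self
          exact (List.mem_filter.mp ((PySem.List.mem_sorted _ _ _ _).mp this)).1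
        have hne : pos ≠ k + 1 := fun hh => h (hh ▸ hpos)
        simp only [aLoopR]
        rw [if_pos hne]

-- ===== VERDICT (by name: the statement is the Claim_ definition above) =====
theorem maximal_flexible_span_py_spec : Claim_equal_maximal_flexible_span_py := by
  intro all free k _ hnd
  unfold Spec_maximal_flexible_span_py maximal_flexible_span_py maximal_flexible_span_py_alt
  refine Prod.ext ?_ ?_ <;> simp only
  · exact left_eq all free hnd all.length k k (by simpa using List.length_filter_le _ all)
  · exact right_eq all free hnd all.length k k (by simpa using List.length_filter_le _ all)
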